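-- pv_equiv track=rewrite | github.com/wll1014/KKB | NLP/L1/作业/machine_talk_optional.py | segment_match
-- ===== SOURCE A (Python) =====
-- def segment_match(pattern, saying):
--     seg_pat, rest = pattern[0], pattern[1:]
--     seg_pat = seg_pat.replace('XZ', 'X')
--
--     if not rest: return (seg_pat, saying), len(saying)
--
--     for i, token in enumerate(saying):
--         if rest[0] == token and is_match(rest[1:], saying[(i + 1):]):
--             return (seg_pat, saying[:i]), i
--
--     return (seg_pat, saying), len(saying)
--
-- def is_match(rest, saying):
--     if not rest and not saying:
--         return True
--     if not all(a.isalpha() for a in rest[0]):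
--         return True
--     if rest[0] != saying[0]:
--         return False
--     return is_match(rest[1:], saying[1:])
-- ===== SOURCE B (Python) =====
-- def _prefix_ok(rest, saying, s):
--     # index-based scan: does rest[1:] match saying[s:] token by token,
--     # stopping early at the first non-alphabetic pattern token (wildcard)?
--     for tok in rest[1:]:
--         if not all(c.isalpha() for c in tok):
--             return True
--         if s >= len(saying) or tok != saying[s]:
--             return False
--         s += 1
--     return s == len(saying)
--
-- def segment_match(pattern, saying):
--     seg = pattern[0].replace('XZ', 'X')
--     rest = pattern[1:]
--     if rest:
--         first = rest[0]
--         for i in range(len(saying)):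
--             if saying[i] == first and _prefix_ok(rest, saying, i + 1):
--                 return (seg, saying[:i]), i
--     return (seg, saying), len(saying)
-- ===== Notes on version B (the rewrite author's own statement) =====
-- stated objective: alternative
-- what changed: The recursive slicing helper is_match is replaced by an index-based prefix scan (_prefix_ok) that iterates rest[1:] while carrying a position into saying, with explicit bounds checks instead of IndexError-prone head access, and segment_match scans candidate indices with range(len(saying)) instead of enumerate+slices.
import Mathlib
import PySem

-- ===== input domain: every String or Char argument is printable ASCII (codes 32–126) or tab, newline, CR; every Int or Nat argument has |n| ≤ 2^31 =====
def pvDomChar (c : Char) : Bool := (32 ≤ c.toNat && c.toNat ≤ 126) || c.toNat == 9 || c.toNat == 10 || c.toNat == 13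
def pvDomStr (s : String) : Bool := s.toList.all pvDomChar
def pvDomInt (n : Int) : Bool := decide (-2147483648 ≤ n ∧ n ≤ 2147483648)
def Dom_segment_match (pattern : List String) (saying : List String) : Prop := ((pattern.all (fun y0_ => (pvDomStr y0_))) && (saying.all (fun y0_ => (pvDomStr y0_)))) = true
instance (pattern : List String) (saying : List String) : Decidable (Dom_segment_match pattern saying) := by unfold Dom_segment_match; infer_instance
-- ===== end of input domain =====

-- B replaces the recursive, slice-based helper is_match by an index-based prefix scan with
-- explicit bounds checks; same results wherever A returns (objective: alternative decomposition).

-- shared helper: `all(a.isalpha() for a in tok)` (True on the empty string)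
def allAlpha (tok : String) : Bool := tok.toList.all PySem.Chars.isalpha

-- ===== PORT A =====
-- is_match; `none` marks the two IndexError sites (rest[0] of [], saying[0] of [])
def is_matchA : List String → List String → Option Bool
  | [], [] => some true
  | [], _ :: _ => none
  | t :: rs, saying =>
    if allAlpha t = false then some true
    else match saying with
      | [] => none
      | u :: ss => if t ≠ u then some false else is_matchA rs ss

-- the `for i, token in enumerate(saying)` loop; `none` = an is_match call raised
def loopA (seg r0 : String) (rs full : List String) : List String → Nat → Option ((String × List String) × Int)
  | [], _ => some ((seg, full), (full.length : Int))
  | tok :: more, i =>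
    if r0 = tok then
      match is_matchA rs more with
      | none => none
      | some true => some ((seg, full.take i), (i : Int))
      | some false => loopA seg r0 rs full more (i + 1)
    else loopA seg r0 rs full more (i + 1)

def segment_match (pattern : List String) (saying : List String) : (String × List String) × Int :=
  match pattern with
  | [] => (("", []), 0)  -- pattern[0] raises IndexError; excluded by Pre_
  | p0 :: rest =>
    let seg := PySem.Str.replace p0 "XZ" "X"
    match rest with
    | [] => ((seg, saying), (saying.length : Int))
    | r0 :: rs => (loopA seg r0 rs saying saying 0).getD ((seg, saying), (saying.length : Int))

-- ===== PORT B =====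
-- _prefix_ok: scan rest[1:] with a moving index s into saying
def prefix_okB : List String → List String → Nat → Bool
  | [], saying, s => s == saying.length
  | tok :: more, saying, s =>
    if allAlpha tok = false then true
    else if saying.length ≤ s then false
    else if tok ≠ saying.getD s "" then false
    else prefix_okB more saying (s + 1)

-- the `for i in range(len(saying))` loop (fuel = remaining indices)
def loopB (seg first : String) (rtail saying : List String) : Nat → Nat → (String × List String) × Int
  | _, 0 => ((seg, saying), (saying.length : Int))
  | i, fuel + 1 =>
    if saying.getD i "" = first && prefix_okB rtail saying (i + 1) then ((seg, saying.take i), (i : Int))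
    else loopB seg first rtail saying (i + 1) fuel

def segment_match_alt (pattern : List String) (saying : List String) : (String × List String) × Int :=
  match pattern with
  | [] => (("", []), 0)
  | p0 :: rest =>
    let seg := PySem.Str.replace p0 "XZ" "X"
    match rest with
    | [] => ((seg, saying), (saying.length : Int))
    | first :: rtail => loopB seg first rtail saying 0 saying.length

-- ===== PRECONDITION & SPEC =====
-- at step k the is_match walk continues (both heads exist, alphabetic, equal)
def contA (rest saying : List String) (k : Nat) : Bool :=
  decide (k < rest.length) && decide (k < saying.length) &&
    allAlpha (rest.getD k "") && decide (rest.getD k "" = saying.getD k "")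

-- at step j the is_match walk hits one of its two IndexError sites
def raiseStopA (rest saying : List String) (j : Nat) : Bool :=
  (decide (j = rest.length) && decide (j < saying.length)) ||
    (decide (j < rest.length) && allAlpha (rest.getD j "") && decide (j = saying.length))

-- at step j the is_match walk returns True (both lists exhausted, or a non-alphabetic pattern token)
def trueStopA (rest saying : List String) (j : Nat) : Bool :=
  (decide (j = rest.length) && decide (j = saying.length)) ||
    (decide (j < rest.length) && !allAlpha (rest.getD j ""))

-- is_match rest saying returns (does not raise): no reachable step is an IndexError site
def okA (rest saying : List String) : Bool :=
  (List.range (rest.length + 1)).all fun j =>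
    !((List.range j).all fun k => contA rest saying k) || !raiseStopA rest saying j

-- is_match rest saying returns True: some reachable step is a True exit
def matchTrueA (rest saying : List String) : Bool :=
  (List.range (rest.length + 1)).any fun j =>
    ((List.range j).all fun k => contA rest saying k) && trueStopA rest saying j

-- the loop reaches position i (no earlier matching position made is_match return True)
-- and at a matching position i the is_match call returns without an IndexError
def safeScan (pattern saying : List String) : Prop :=
  ∀ i ∈ List.range saying.length,
    pattern.tail ≠ [] → pattern.tail.getD 0 "" = saying.getD i "" →
      (∀ j ∈ List.range i, pattern.tail.getD 0 "" = saying.getD j "" →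
        matchTrueA pattern.tail.tail (saying.drop (j + 1)) = false) →
      okA pattern.tail.tail (saying.drop (i + 1)) = true

-- Pre_ excludes exactly the inputs on which A raises IndexError: the empty pattern
-- (pattern[0]), and inputs where the first is_match call the loop actually reaches
-- at a matching token runs off either list.
def Pre_segment_match (pattern : List String) (saying : List String) : Prop :=
  pattern ≠ [] ∧ safeScan pattern saying

instance (pattern : List String) (saying : List String) : Decidable (Pre_segment_match pattern saying) := by
  unfold Pre_segment_match safeScan; infer_instance

def pvWitness_segment_match : List String × List String := (["P X", "you"], ["I", "you"])

def Spec_segment_match (pattern : List String) (saying : List String) (out : (String × List String) × Int) : Prop := out = segment_match_alt pattern saying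
instance (pattern : List String) (saying : List String) (out : (String × List String) × Int) : Decidable (Spec_segment_match pattern saying out) := by unfold Spec_segment_match; infer_instance

-- ===== CLAIM (what is proved, stated in full; the proofs are below) =====
def Claim_equal_segment_match : Prop := ∀ (pattern : List String) (saying : List String), Dom_segment_match pattern saying → Pre_segment_match pattern saying → Spec_segment_match pattern saying (segment_match pattern saying)

-- ===== LEMMAS AND PROOFS =====

lemma okA_iff (rest saying : List String) :
    okA rest saying = true ↔
      ∀ j, j ≤ rest.length → (∀ k, k < j → contA rest saying k = true) →
        raiseStopA rest saying j = false := by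
  simp [okA, List.mem_range, Decidable.or_iff_not_imp_left]

lemma contA_succ (t u : String) (rs ss : List String) (k : Nat) :
    contA (t :: rs) (u :: ss) (k + 1) = contA rs ss k := by
  simp [contA]

lemma raiseStopA_succ (t u : String) (rs ss : List String) (j : Nat) :
    raiseStopA (t :: rs) (u :: ss) (j + 1) = raiseStopA rs ss j := by
  simp [raiseStopA]

lemma trueStopA_succ (t u : String) (rs ss : List String) (j : Nat) :
    trueStopA (t :: rs) (u :: ss) (j + 1) = trueStopA rs ss j := by
  simp [trueStopA]

lemma okA_cons (t u : String) (rs ss : List String)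
    (ha : allAlpha t = true) (heq : t = u)
    (h : okA (t :: rs) (u :: ss) = true) : okA rs ss = true := by
  subst heq
  rw [okA_iff] at h ⊢
  intro j hj hcont
  have h0 : contA (t :: rs) (t :: ss) 0 = true := by
    simp [contA, ha]
  have := h (j + 1) (by simpa using Nat.succ_le_succ hj) (by
    intro k hk
    cases k with
    | zero => exact h0
    | succ k' => rw [contA_succ]; exact hcont k' (Nat.lt_of_succ_lt_succ hk))
  rwa [raiseStopA_succ] at this

lemma okA_nil_iff (ss : List String) : okA [] ss = true ↔ ss = [] := by
  rw [okA_iff]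
  constructor
  · intro h
    have := h 0 (Nat.zero_le _) (fun k hk => absurd hk (Nat.not_lt_zero k))
    simpa [raiseStopA] using this
  · rintro rfl j hj _
    have : j = 0 := Nat.le_zero.mp hj
    subst this; simp [raiseStopA]

lemma matchTrueA_cons (t u : String) (rs ss : List String)
    (ha : allAlpha t = true) (heq : t = u) :
    matchTrueA (t :: rs) (u :: ss) = matchTrueA rs ss := by
  subst heq
  have h0 : contA (t :: rs) (t :: ss) 0 = true := by simp [contA, ha]
  simp only [matchTrueA, List.length_cons]
  rw [List.range_succ_eq_map, List.any_cons, List.any_map]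
  have hf0 : (((List.range 0).all fun k => contA (t :: rs) (t :: ss) k) &&
      trueStopA (t :: rs) (t :: ss) 0) = false := by
    simp [trueStopA, ha]
  rw [hf0, Bool.false_or]
  congr 1
  funext j
  simp only [Function.comp]
  rw [List.range_succ_eq_map, List.all_cons, List.all_map, h0, Bool.true_and, trueStopA_succ]
  congr 1
  congr 1
  funext k
  simp only [Function.comp]
  exact contA_succ t t rs ss k

lemma isMatch_matchTrue :
    ∀ (rest saying : List String) (b : Bool), is_matchA rest saying = some b →
      matchTrueA rest saying = b := by
  intro rest
  induction rest with
  | nil =>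
    intro saying b h
    cases saying with
    | nil =>
      simp [is_matchA] at h
      subst h; decide
    | cons u ss => simp [is_matchA] at h
  | cons t rs ih =>
    intro saying b h
    by_cases ha : allAlpha t = false
    · simp [is_matchA, ha] at h
      subst h
      apply List.any_eq_true.mpr
      exact ⟨0, by simp, by simp [trueStopA, ha]⟩
    · rw [Bool.not_eq_false] at ha
      cases saying with
      | nil => simp [is_matchA, ha] at h
      | cons u ss =>
        by_cases hne : t = u
        · subst hne
          have h' : is_matchA rs ss = some b := by
            simpa [is_matchA, ha] using h
          rw [matchTrueA_cons t t rs ss ha rfl]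
          exact ih ss b h'
        · have hb : b = false := by
            have := h
            simp [is_matchA, ha, hne] at this
            exact this
          subst hb
          apply List.any_eq_false.mpr
          intro j hj
          cases j with
          | zero => simp [trueStopA, ha]
          | succ k =>
            have hc : contA (t :: rs) (u :: ss) 0 = false := by
              simp [contA, hne]
            have : ((List.range (k + 1)).all fun k' => contA (t :: rs) (u :: ss) k') = false := by
              rw [List.range_succ_eq_map, List.all_cons, hc, Bool.false_and]
            simp [this]

lemma isMatch_eq (rs : List String) :
    ∀ (saying : List String) (s : Nat), s ≤ saying.length →
      okA rs (saying.drop s) = true →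
      is_matchA rs (saying.drop s) = some (prefix_okB rs saying s) := by
  induction rs with
  | nil =>
    intro saying s hs hok
    have hd : saying.drop s = [] := (okA_nil_iff _).mp hok
    have hlen : s = saying.length := by
      have := List.length_drop (l := saying) (i := s)
      rw [hd] at this; simp at this; omega
    simp [is_matchA, prefix_okB, hlen]
  | cons t rs' ih =>
    intro saying s hs hok
    by_cases ha : allAlpha t = false
    · simp [is_matchA, prefix_okB, ha]
    · rw [Bool.not_eq_false] at ha
      rcases Nat.lt_or_ge s saying.length with hlt | hge
      · have hd := List.drop_eq_getElem_cons hlt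
        by_cases hne : t = saying[s]
        · have hok2 : okA (t :: rs') (saying[s] :: saying.drop (s + 1)) = true := by
            rw [← hd]; exact hok
          have hok' : okA rs' (saying.drop (s + 1)) = true :=
            okA_cons t saying[s] rs' (saying.drop (s + 1)) ha hne hok2
          have ihh := ih saying (s + 1) hlt hok'
          have ha' : allAlpha saying[s] = true := by rw [← hne]; exact ha
          rw [hd]
          simp [is_matchA, prefix_okB, ha', hne, ihh, Nat.not_le.mpr hlt,
            List.getElem?_eq_getElem hlt]
        · rw [hd]
          simp [is_matchA, prefix_okB, ha, hne, Nat.not_le.mpr hlt,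
            List.getElem?_eq_getElem hlt]
      · exfalso
        have hs' : s = saying.length := le_antisymm hs hge
        have hd : saying.drop s = [] := by simp [hs']
        rw [okA_iff] at hok
        have := hok 0 (Nat.zero_le _) (fun k hk => absurd hk (Nat.not_lt_zero k))
        rw [hd] at this
        simp [raiseStopA, ha] at this

lemma loop_eq (seg r0 : String) (rs full : List String) :
    ∀ (suffix : List String) (i : Nat), suffix = full.drop i → i ≤ full.length →
      (∀ j, j < i → r0 = full.getD j "" → matchTrueA rs (full.drop (j + 1)) = false) →
      (∀ j, j < full.length → r0 = full.getD j "" →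
        (∀ k, k < j → r0 = full.getD k "" → matchTrueA rs (full.drop (k + 1)) = false) →
        okA rs (full.drop (j + 1)) = true) →
      loopA seg r0 rs full suffix i = some (loopB seg r0 rs full i (full.length - i)) := by
  intro suffix
  induction suffix with
  | nil =>
    intro i hsuf hi _ _
    have : i = full.length := by
      have := List.length_drop (l := full) (i := i)
      rw [← hsuf] at this; simp at this; omega
    simp [loopA, this, loopB]
  | cons tok more ih =>
    intro i hsuf hi hfalse hsafe
    have hilt : i < full.length := by
      rcases Nat.lt_or_ge i full.length with h | h
      · exact h
      · rw [List.drop_eq_nil_of_le h] at hsuf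
        exact absurd hsuf (List.cons_ne_nil _ _)
    have hd : full.drop i = full[i] :: full.drop (i + 1) := List.drop_eq_getElem_cons hilt
    rw [hd] at hsuf
    injection hsuf with htok hmore
    have hgd : full.getD i "" = full[i] := List.getD_eq_getElem _ _ hilt
    have hfuel : full.length - i = (full.length - (i + 1)) + 1 := by omega
    rw [hfuel]
    by_cases hr : r0 = tok
    · have hcond : full.getD i "" = r0 := by rw [hgd, ← htok, hr]
      have hok : okA rs (full.drop (i + 1)) = true :=
        hsafe i hilt (by rw [hcond]) (fun k hk => hfalse k hk)
      have hm : is_matchA rs more = some (prefix_okB rs full (i + 1)) := by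
        rw [hmore]; exact isMatch_eq rs full (i + 1) hilt hok
      by_cases hp : prefix_okB rs full (i + 1) = true
      · simp [loopA, loopB, hr, htok, hm, hp, List.getElem?_eq_getElem hilt]
      · rw [Bool.not_eq_true] at hp
        have hmt : matchTrueA rs (full.drop (i + 1)) = false := by
          have hm' := hm
          rw [hmore] at hm'
          rw [hp] at hm'
          exact isMatch_matchTrue rs (full.drop (i + 1)) false hm' 
        have hfalse' : ∀ j, j < i + 1 → r0 = full.getD j "" →
            matchTrueA rs (full.drop (j + 1)) = false := by
          intro j hj hrj
          rcases Nat.lt_or_ge j i with h | h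
          · exact hfalse j h hrj
          · have : j = i := by omega
            subst this; exact hmt
        have ihh := ih (i + 1) hmore hilt hfalse' hsafe
        simp only [loopA, loopB, if_pos hr, hm, hp]
        rw [if_neg (by simp [List.getElem?_eq_getElem hilt, ← htok])]
        exact ihh
    · have hcond2 : ¬ (full[i] = r0) := by
        rw [← htok]; exact fun h => hr h.symm
      have hfalse' : ∀ j, j < i + 1 → r0 = full.getD j "" →
          matchTrueA rs (full.drop (j + 1)) = false := by
        intro j hj hrj
        rcases Nat.lt_or_ge j i with h | h
        · exact hfalse j h hrj
        · have : j = i := by omega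
          subst this
          exfalso
          exact hcond2 (by rw [← hgd, ← hrj])
      have ihh := ih (i + 1) hmore hilt hfalse' hsafe
      simp only [loopA, if_neg hr, loopB]
      rw [if_neg (by simp [List.getElem?_eq_getElem hilt]; exact fun h => absurd h hcond2)]
      exact ihh

-- ===== VERDICT (by name: the statement is the Claim_ definition above) =====
theorem segment_match_spec : Claim_equal_segment_match := by
  intro pattern saying _ hpre
  unfold Spec_segment_match
  obtain ⟨hne, hsafe⟩ := hpre
  cases pattern with
  | nil => exact absurd rfl hne
  | cons p0 rest =>
    cases rest with
    | nil => rfl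
    | cons r0 rs =>
      have hsafe' : ∀ j, j < saying.length → r0 = saying.getD j "" →
          (∀ k, k < j → r0 = saying.getD k "" → matchTrueA rs (saying.drop (k + 1)) = false) →
          okA rs (saying.drop (j + 1)) = true := by
        intro j hj hr hks
        exact hsafe j (List.mem_range.mpr hj) (by simp) hr
          (fun k hk => hks k (List.mem_range.mp hk))
      show (loopA _ r0 rs saying saying 0).getD _ = _
      rw [loop_eq _ r0 rs saying saying 0 (by simp) (Nat.zero_le _)
        (fun j hj => absurd hj (Nat.not_lt_zero j)) hsafe']
      simp [segment_match_alt]
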